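-- pv_equiv track=rewrite | github.com/MaheryRAVELOSON/ABA | app.py | _find_valid_combinations
-- ===== SOURCE A (Python) =====
-- from itertools import product
--
-- def _find_valid_combinations(premises, arguments):
--     """
--     Trouve les combinaisons valides d'arguments qui satisfont toutes les prémisses
--     """
--     if not premises:
--         return [[]]  # Une combinaison vide pour les règles sans prémisses
--
--     # Grouper les arguments par conclusion
--     args_by_conclusion = {}
--     for arg in arguments:
--         if arg[0] not in args_by_conclusion:
--             args_by_conclusion[arg[0]] = []
--         args_by_conclusion[arg[0]].append(arg)
--
--     # Vérifier que toutes les prémisses peuvent être satisfaites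
--     for premise in premises:
--         if premise not in args_by_conclusion:
--             return []  # Impossible de satisfaire cette prémisse
--
--     # Générer toutes les combinaisons possibles
--     premise_args = [args_by_conclusion[p] for p in premises]
--     combinations = []
--
--     for combo in product(*premise_args):
--         combinations.append(list(combo))
--
--     return combinations
-- ===== SOURCE B (Python) =====
-- def _find_valid_combinations(premises, arguments):
--     if not premises:
--         return [[]]
--     first = premises[0]
--     bucket = [arg for arg in arguments if arg[0] == first]
--     if not bucket:
--         return []
--     tails = _find_valid_combinations(premises[1:], arguments)
--     return [[arg] + tail for arg in bucket for tail in tails]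
-- ===== Notes on version B (the rewrite author's own statement) =====
-- stated objective: alternative
-- what changed: Drops the dict grouping and the itertools.product call entirely: B recurses on the premise list, filtering the argument list for the head premise at each level and prepending each matching argument to every recursively built tail (empty filter = unsatisfiable premise = []).
import Mathlib
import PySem

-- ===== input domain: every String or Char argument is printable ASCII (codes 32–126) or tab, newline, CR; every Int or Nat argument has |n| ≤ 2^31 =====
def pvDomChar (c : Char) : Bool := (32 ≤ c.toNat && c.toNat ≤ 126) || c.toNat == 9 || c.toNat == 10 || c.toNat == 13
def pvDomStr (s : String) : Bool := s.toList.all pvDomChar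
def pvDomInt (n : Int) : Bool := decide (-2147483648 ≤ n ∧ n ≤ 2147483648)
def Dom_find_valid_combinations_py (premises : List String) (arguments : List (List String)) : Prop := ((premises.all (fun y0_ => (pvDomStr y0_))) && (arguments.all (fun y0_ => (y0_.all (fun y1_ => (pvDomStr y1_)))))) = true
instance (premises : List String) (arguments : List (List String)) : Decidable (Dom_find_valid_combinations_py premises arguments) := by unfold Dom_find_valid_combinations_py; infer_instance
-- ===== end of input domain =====

-- B drops the dict grouping and itertools.product: it recurses on the premise list, filtering
-- the arguments for the head premise at each level; objective: alternative decomposition, same cost.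

-- ===== PORT A =====
-- grouping loop body of A: "if arg[0] not in d: d[arg[0]] = []" then "d[arg[0]].append(arg)"
def pvStepA (d : PySem.Dict String (List (List String))) (arg : List String) : PySem.Dict String (List (List String)) :=
  let k := (PySem.List.pyGet? arg 0).getD ""   -- arg[0]; none (IndexError) excluded by Pre_
  let d1 := if d.contains k then d else d.insert k []
  d1.modify k [] (fun l => l ++ [arg])

def pvGroupA (arguments : List (List String)) : PySem.Dict String (List (List String)) :=
  arguments.foldl pvStepA PySem.Dict.empty

-- itertools.product(*lists), leftmost factor slowest, each combo as a list
def pvProduct (ls : List (List (List String))) : List (List (List String)) :=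
  match ls with
  | [] => [[]]
  | l :: ls => l.flatMap (fun x => (pvProduct ls).map (fun t => x :: t))

def find_valid_combinations_py (premises : List String) (arguments : List (List String)) : List (List (List String)) :=
  if premises = [] then [[]]
  else
    let d := pvGroupA arguments
    if premises.all (fun p => d.contains p) then
      pvProduct (premises.map (fun p => d.getD p []))
    else []

-- ===== PORT B =====
-- B's recursion: base case [[]]; else bucket = [arg for arg in arguments if arg[0] == first],
-- [] if the bucket is empty, otherwise prepend each bucket element to every recursive tail.
def find_valid_combinations_py_alt (premises : List String) (arguments : List (List String)) : List (List (List String)) :=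
  match premises with
  | [] => [[]]
  | first :: rest =>
    let bucket := arguments.filter (fun arg => ((PySem.List.pyGet? arg 0).getD "") == first)  -- arg[0]; none excluded by Pre_
    if bucket = [] then []
    else
      let tails := find_valid_combinations_py_alt rest arguments
      bucket.flatMap (fun arg => tails.map (fun tail => arg :: tail))

-- ===== PRECONDITION & SPEC =====
-- Pre_ excludes inputs where A raises IndexError: premises nonempty and some argument is the empty list (arg[0] fails).
def Pre_find_valid_combinations_py (premises : List String) (arguments : List (List String)) : Prop :=
  premises = [] ∨ ∀ arg ∈ arguments, arg ≠ []
instance (premises : List String) (arguments : List (List String)) : Decidable (Pre_find_valid_combinations_py premises arguments) := by unfold Pre_find_valid_combinations_py; infer_instance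
def pvWitness_find_valid_combinations_py : List String × List (List String) := (["a"], [["a", "x"], ["b"]])

def Spec_find_valid_combinations_py (premises : List String) (arguments : List (List String)) (out : List (List (List String))) : Prop := out = find_valid_combinations_py_alt premises arguments
instance (premises : List String) (arguments : List (List String)) (out : List (List (List String))) : Decidable (Spec_find_valid_combinations_py premises arguments out) := by unfold Spec_find_valid_combinations_py; infer_instance

-- ===== CLAIM (what is proved, stated in full; the proofs are below) =====
def Claim_equal_find_valid_combinations_py : Prop := ∀ (premises : List String) (arguments : List (List String)), Dom_find_valid_combinations_py premises arguments → Pre_find_valid_combinations_py premises arguments → Spec_find_valid_combinations_py premises arguments (find_valid_combinations_py premises arguments)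

-- ===== LEMMAS AND PROOFS =====

-- the key A groups by / B filters by
def pvKey (arg : List String) : String := (PySem.List.pyGet? arg 0).getD ""

-- one grouping step, seen through getD
theorem pvStepA_getD (d : PySem.Dict String (List (List String))) (a : List String) (p : String) :
    (pvStepA d a).getD p [] = if pvKey a == p then d.getD p [] ++ [a] else d.getD p [] := by
  unfold pvStepA
  by_cases hk : pvKey a = p
  · have hkp : ((PySem.List.pyGet? a 0).getD "") = p := hk
    simp only [hkp, beq_self_eq_true, if_true, pvKey]
    by_cases hc : d.contains p = true
    · simp only [hc, if_true]
      rw [PySem.Dict.getD_modify_self]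
    · simp only [hc, if_false, Bool.false_eq_true]
      rw [PySem.Dict.getD_modify_self, PySem.Dict.getD_insert_self,
          PySem.Dict.getD_of_not_contains d ([] : List (List String)) (by simpa using hc)]
  · have hb : (pvKey a == p) = false := by simp [hk]
    have hne : p ≠ (PySem.List.pyGet? a 0).getD "" := fun h => hk (by simp [pvKey, h])
    simp only [hb, Bool.false_eq_true, if_false]
    by_cases hc : d.contains ((PySem.List.pyGet? a 0).getD "") = true
    · simp only [hc, if_true]
      rw [PySem.Dict.getD_modify_of_ne _ _ _ hne]
    · simp only [hc, if_false, Bool.false_eq_true]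
      rw [PySem.Dict.getD_modify_of_ne _ _ _ hne,
          PySem.Dict.getD_insert_of_ne _ _ _ hne]

-- one grouping step, seen through contains
theorem pvStepA_contains (d : PySem.Dict String (List (List String))) (a : List String) (p : String) :
    (pvStepA d a).contains p = (p == pvKey a || d.contains p) := by
  unfold pvStepA pvKey
  by_cases hc : d.contains ((PySem.List.pyGet? a 0).getD "") = true
  · simp only [hc, if_true]
    rw [PySem.Dict.contains_modify]
  · simp only [hc, if_false, Bool.false_eq_true]
    rw [PySem.Dict.contains_modify, PySem.Dict.contains_insert]
    cases p == ((PySem.List.pyGet? a 0).getD "") <;> simp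

theorem foldl_stepA_getD (arguments : List (List String)) (p : String) :
    ∀ d, (arguments.foldl pvStepA d).getD p []
      = d.getD p [] ++ arguments.filter (fun a => pvKey a == p) := by
  induction arguments with
  | nil => intro d; simp
  | cons a rest ih =>
    intro d
    rw [List.foldl_cons, ih, pvStepA_getD, List.filter_cons]
    by_cases h : (pvKey a == p) = true <;> simp [h]

theorem foldl_stepA_contains (arguments : List (List String)) (p : String) :
    ∀ d, (arguments.foldl pvStepA d).contains p
      = (d.contains p || arguments.any (fun a => pvKey a == p)) := by
  induction arguments with
  | nil => intro d; simp
  | cons a rest ih =>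
    intro d
    rw [List.foldl_cons, ih, pvStepA_contains, List.any_cons]
    have hswap : (p == pvKey a) = (pvKey a == p) := by
      by_cases h : p = pvKey a
      · simp [h]
      · simp [h, Ne.symm h]
    rw [hswap]
    cases d.contains p <;> cases (pvKey a == p) <;> simp

-- A's grouping dict looked up at p is exactly B's filter of the arguments
theorem pvGroupA_getD (arguments : List (List String)) (p : String) :
    (pvGroupA arguments).getD p [] = arguments.filter (fun a => pvKey a == p) := by
  unfold pvGroupA
  rw [foldl_stepA_getD]
  simp

-- membership in A's dict ⇔ some argument has this conclusion
theorem pvGroupA_contains (arguments : List (List String)) (p : String) :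
    (pvGroupA arguments).contains p = arguments.any (fun a => pvKey a == p) := by
  unfold pvGroupA
  rw [foldl_stepA_contains]
  simp

-- B returns [] as soon as some premise's filter is empty
theorem alt_of_missing (premises : List String) (arguments : List (List String)) (p : String)
    (hp : p ∈ premises) (he : arguments.filter (fun a => pvKey a == p) = []) :
    find_valid_combinations_py_alt premises arguments = [] := by
  induction premises with
  | nil => cases hp
  | cons q rest ih =>
    unfold find_valid_combinations_py_alt
    rcases List.mem_cons.mp hp with h | h
    · subst h
      simp only [pvKey] at he
      simp [he]
    · by_cases hq : arguments.filter (fun arg => ((PySem.List.pyGet? arg 0).getD "") == q) = []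
      · simp [hq]
      · simp only [hq, if_false]
        rw [ih h]
        simp

-- when every premise's filter is nonempty, B computes the product of the filters
theorem alt_of_all (premises : List String) (arguments : List (List String))
    (h : ∀ p ∈ premises, arguments.filter (fun a => pvKey a == p) ≠ []) :
    find_valid_combinations_py_alt premises arguments
      = pvProduct (premises.map (fun p => arguments.filter (fun a => pvKey a == p))) := by
  induction premises with
  | nil => simp [find_valid_combinations_py_alt, pvProduct]
  | cons q rest ih =>
    unfold find_valid_combinations_py_alt
    have hq : arguments.filter (fun arg => ((PySem.List.pyGet? arg 0).getD "") == q) ≠ [] := by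
      simpa [pvKey] using h q (List.mem_cons_self ..)
    simp only [hq, if_false, List.map_cons, pvProduct]
    rw [ih (fun p hp => h p (List.mem_cons_of_mem _ hp))]
    rfl

-- ===== VERDICT (by name: the statement is the Claim_ definition above) =====
theorem find_valid_combinations_py_spec : Claim_equal_find_valid_combinations_py := by
  intro premises arguments _ _
  unfold Spec_find_valid_combinations_py find_valid_combinations_py
  by_cases hnil : premises = []
  · simp [hnil, find_valid_combinations_py_alt]
  · simp only [hnil, if_false]
    by_cases hall : premises.all (fun p => (pvGroupA arguments).contains p) = true
    · rw [if_pos hall]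
      have hne : ∀ p ∈ premises, arguments.filter (fun a => pvKey a == p) ≠ [] := by
        intro p hp
        have h1 := List.all_eq_true.mp hall p hp
        rw [pvGroupA_contains] at h1
        rcases List.any_eq_true.mp h1 with ⟨a, ha, hk⟩
        intro hcon
        exact absurd hk (by simpa using (List.filter_eq_nil_iff.mp hcon a ha))
      rw [alt_of_all _ _ hne]
      congr 1
      exact List.map_congr_left (fun p _ => pvGroupA_getD arguments p)
    · rw [if_neg hall]
      simp only [List.all_eq_true, not_forall] at hall
      rcases hall with ⟨p, hp, hnp⟩
      have hfil : arguments.filter (fun a => pvKey a == p) = [] := by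
        rw [List.filter_eq_nil_iff]
        intro a ha
        simp only [pvGroupA_contains] at hnp
        intro hk
        exact hnp (List.any_eq_true.mpr ⟨a, ha, hk⟩)
      exact (alt_of_missing premises arguments p hp hfil).symm
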